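-- pv_equiv track=rewrite | github.com/emarberg/stable-grothendieck | tests/test_conjectures_little.py | minimal_word
-- ===== SOURCE A (Python) =====
-- def minimal_word(mu):
--     if len(mu) == 0:
--         return ()
--     columns = [sum([1 for i in range(len(mu)) if mu[i] + i >= j]) for j in range(len(mu) + 1, mu[0] + 1)]
--     word = [i for j in range(len(mu)) for i in range(2 * j + 1, j, -1)]
--     m = max(word) + 1
--     for c in columns:
--         word += [i for i in range(m, m - c, -1)]
--         m += 1
--     return tuple(word)
-- ===== SOURCE B (Python) =====
-- def minimal_word(mu):
--     n = len(mu)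
--     if n == 0:
--         return ()
--     word = []
--     for j in range(n):
--         word.extend(range(2 * j + 1, j, -1))
--     vs = sorted(mu[i] + i for i in range(n))
--     p = 0
--     for j in range(n + 1, mu[0] + 1):
--         while vs[p] < j:
--             p += 1
--         base = n + j - 1
--         word.extend(range(base, base - (n - p), -1))
--     return tuple(word)
-- ===== Notes on version B (the rewrite author's own statement) =====
-- stated objective: faster
-- what changed: Instead of rescanning all of mu for every column j (an O(n) sum per column), B sorts the values mu[i]+i once and sweeps a monotone pointer over them while j grows, so each column count is read off in amortized O(1); the column base index n+j-1 is computed directly instead of threading A's running counter over a materialized columns list.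
import Mathlib
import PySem

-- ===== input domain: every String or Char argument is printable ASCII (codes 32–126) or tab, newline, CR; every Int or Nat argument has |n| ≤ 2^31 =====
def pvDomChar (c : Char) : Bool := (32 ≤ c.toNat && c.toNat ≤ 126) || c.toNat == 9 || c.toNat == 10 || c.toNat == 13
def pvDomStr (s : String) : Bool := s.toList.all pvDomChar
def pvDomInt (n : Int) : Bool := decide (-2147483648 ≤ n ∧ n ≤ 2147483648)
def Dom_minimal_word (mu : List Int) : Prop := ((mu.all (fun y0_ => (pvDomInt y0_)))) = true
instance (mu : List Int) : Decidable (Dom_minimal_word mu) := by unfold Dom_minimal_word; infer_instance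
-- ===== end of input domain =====

-- B replaces A's per-column O(n) scan by a sort of the values mu[i]+i and a monotone pointer,
-- O(n·m) → O(n log n + m + |output|); same return value everywhere.

-- ===== PORT A =====
def minimal_word (mu : List Int) : List Int :=
  if mu.length = 0 then []
  else
    let n : Int := (mu.length : Int)
    let columns : List Int :=
      (PySem.List.pyRange (n + 1) (PySem.List.pyGetD mu 0 0 + 1)).map
        (fun j => (((PySem.List.pyRange 0 n).filter
            (fun i => decide (PySem.List.pyGetD mu i 0 + i ≥ j))).map (fun _ => (1 : Int))).sum)
    let word : List Int :=
      (PySem.List.pyRange 0 n).flatMap (fun j => PySem.List.pyRange (2 * j + 1) j (-1))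
    let m : Int := (PySem.List.max? word (fun x => x)).getD 0 + 1
    (columns.foldl (fun (s : List Int × Int) c =>
        (s.1 ++ PySem.List.pyRange s.2 (s.2 - c) (-1), s.2 + 1)) (word, m)).1

-- ===== PORT B =====
-- B's while loop 'while vs[p] < j: p += 1'; the p < vs.length test only makes the recursion
-- total (the Python loop never runs off the end because j ≤ mu[0] ≤ max(vs)).
def advP (vs : List Int) (j : Int) (p : Nat) : Nat :=
  if h : p < vs.length then
    if PySem.List.pyGetD vs (p : Int) 0 < j then advP vs j (p + 1) else p
  else p
termination_by vs.length - p

def minimal_word_alt (mu : List Int) : List Int :=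
  let n : Int := (mu.length : Int)
  if n = 0 then []
  else
    let word0 : List Int := (PySem.List.pyRange 0 n).foldl
      (fun acc j => acc ++ PySem.List.pyRange (2 * j + 1) j (-1)) []
    let vs : List Int := PySem.List.sorted
      ((PySem.List.pyRange 0 n).map (fun i => PySem.List.pyGetD mu i 0 + i)) (fun x => x)
    let s := (PySem.List.pyRange (n + 1) (PySem.List.pyGetD mu 0 0 + 1)).foldl
      (fun (s : List Int × Nat) j =>
        let p := advP vs j s.2
        let base := n + j - 1
        (s.1 ++ PySem.List.pyRange base (base - (n - (p : Int))) (-1), p))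
      (word0, 0)
    s.1

-- ===== PRECONDITION & SPEC =====
def Spec_minimal_word (mu : List Int) (out : List Int) : Prop := out = minimal_word_alt mu
instance (mu : List Int) (out : List Int) : Decidable (Spec_minimal_word mu out) := by unfold Spec_minimal_word; infer_instance

-- ===== CLAIM (what is proved, stated in full; the proofs are below) =====
def Claim_equal_minimal_word : Prop := ∀ (mu : List Int), Dom_minimal_word mu → Spec_minimal_word mu (minimal_word mu)

-- ===== LEMMAS AND PROOFS =====

-- length of the `< j` prefix of vs / number of elements ≥ j
def pvTW (vs : List Int) (j : Int) : Nat := (vs.takeWhile (fun v => decide (v < j))).length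
def pvCnt (vs : List Int) (j : Int) : Nat := vs.countP (fun v => decide (j ≤ v))

lemma pvTW_le (vs : List Int) (j : Int) : pvTW vs j ≤ vs.length := by
  unfold pvTW
  exact (List.takeWhile_prefix _).length_le

lemma takeWhile_getElem_sat {α : Type} (q : α → Bool) (l : List α) (i : Nat)
    (h : i < (l.takeWhile q).length) (hl : i < l.length) : q l[i] = true := by
  have hpre := List.takeWhile_prefix (l := l) (p := q)
  have heq := hpre.getElem (i := i) h
  have hq : q ((List.takeWhile q l)[i]) = true := List.mem_takeWhile_imp (List.getElem_mem h)
  rw [heq] at hq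
  exact hq

lemma takeWhile_getElem_fail {α : Type} (q : α → Bool) (l : List α)
    (h : (l.takeWhile q).length < l.length) : q (l[(l.takeWhile q).length]'h) = false := by
  induction l with
  | nil => simp at h
  | cons x t ih =>
    by_cases hq : q x
    · simp only [List.takeWhile_cons, hq] at h ⊢
      simpa using ih (by simpa using h)
    · simp only [List.takeWhile_cons, if_neg hq] at h ⊢
      simpa using hq

lemma advP_eq_pvTW (vs : List Int) (j : Int) : ∀ (k p : Nat), vs.length - p ≤ k →
    p ≤ pvTW vs j → advP vs j p = pvTW vs j := by
  intro k
  induction k with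
  | zero =>
    intro p hk hp
    have hle := pvTW_le vs j
    rw [advP, dif_neg (by omega)]
    omega
  | succ k ih =>
    intro p hk hp
    rw [advP]
    by_cases hlt : p < vs.length
    · rw [dif_pos hlt]
      have hg : PySem.List.pyGetD vs (p : Int) 0 = vs[p] :=
        PySem.List.pyGetD_eq_getElem vs 0 (by positivity) (by exact_mod_cast hlt)
      by_cases hv : vs[p] < j
      · have hplt : p < pvTW vs j := by
          rcases Nat.lt_or_ge p (pvTW vs j) with h | h
          · exact h
          · exfalso
            have hf := takeWhile_getElem_fail (fun v => decide (v < j)) vs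
              (by change pvTW vs j < vs.length; omega)
            simp only [decide_eq_false_iff_not] at hf
            have hidx : (List.takeWhile (fun v => decide (v < j)) vs).length = p := by
              change pvTW vs j = p; omega
            apply hf
            simp only [hidx]
            exact hv
        rw [if_pos (by rw [hg]; exact hv)]
        exact ih (p + 1) (by omega) hplt
      · rw [if_neg (by rw [hg]; exact hv)]
        rcases Nat.lt_or_ge p (pvTW vs j) with h | h
        · exfalso
          have hst := takeWhile_getElem_sat (fun v => decide (v < j)) vs p h hlt
          simp only [decide_eq_true_eq] at hst
          exact hv hst
        · omega
    · rw [dif_neg hlt]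
      have hle := pvTW_le vs j
      omega

lemma countP_lt_eq_pvTW (vs : List Int) (hs : vs.Pairwise (· ≤ ·)) (j : Int) :
    vs.countP (fun v => decide (v < j)) = pvTW vs j := by
  induction vs with
  | nil => simp [pvTW]
  | cons x t ih =>
    rcases List.pairwise_cons.1 hs with ⟨hx, ht⟩
    by_cases hq : x < j
    · simp only [pvTW, List.takeWhile_cons, List.countP_cons, hq,
        decide_true, if_true]
      rw [show t.countP (fun v => decide (v < j)) = pvTW t j from ih ht]
      simp [pvTW]
    · simp only [pvTW, List.takeWhile_cons, List.countP_cons, hq, decide_false]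
      have h0 : t.countP (fun v => decide (v < j)) = 0 := by
        rw [List.countP_eq_zero]
        intro y hy
        have := hx y hy
        simp only [decide_eq_true_eq]
        omega
      simp [h0]

lemma pvCnt_eq (vs : List Int) (hs : vs.Pairwise (· ≤ ·)) (j : Int) :
    pvCnt vs j = vs.length - pvTW vs j := by
  have hsplit := List.length_eq_countP_add_countP (fun v => decide (v < j)) (l := vs)
  have hcompl : vs.countP (fun a => decide ¬(decide (a < j) = true)) = pvCnt vs j := by
    unfold pvCnt
    apply List.countP_congr
    intro a _
    simp only [decide_eq_true_eq, decide_not]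
    by_cases h : a < j
    · simp [h, show ¬ (j ≤ a) by omega]
    · simp [h, show j ≤ a by omega]
  rw [countP_lt_eq_pvTW vs hs j, hcompl] at hsplit
  omega

lemma pvTW_mono (vs : List Int) (hs : vs.Pairwise (· ≤ ·)) {j j' : Int} (h : j ≤ j') :
    pvTW vs j ≤ pvTW vs j' := by
  rw [← countP_lt_eq_pvTW vs hs j, ← countP_lt_eq_pvTW vs hs j']
  apply List.countP_mono_left
  intro x _ hx
  simp only [decide_eq_true_eq] at hx ⊢
  omega

lemma foldA_char (g : Int → Int) (K : Int) : ∀ (k : Nat) (a b : Int) (acc : List Int),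
    (b - a).toNat ≤ k →
    ((PySem.List.pyRange a b).foldl (fun (s : List Int × Int) j =>
        (s.1 ++ PySem.List.pyRange s.2 (s.2 - g j) (-1), s.2 + 1)) (acc, K + a)).1
    = acc ++ (PySem.List.pyRange a b).flatMap
        (fun j => PySem.List.pyRange (K + j) (K + j - g j) (-1)) := by
  intro k
  induction k with
  | zero =>
    intro a b acc hk
    have hnil : PySem.List.pyRange a b = [] :=
      List.eq_nil_of_length_eq_zero (by rw [PySem.List.length_pyRange_one]; omega)
    simp [hnil]
  | succ k ih =>
    intro a b acc hk
    by_cases hab : a < b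
    · rw [PySem.List.pyRange_one_cons hab]
      simp only [List.foldl_cons, List.flatMap_cons]
      have h1 : K + a + 1 = K + (a + 1) := by ring
      rw [h1, ih (a + 1) b (acc ++ PySem.List.pyRange (K + a) (K + a - g a) (-1))
        (by omega), List.append_assoc]
    · have hnil : PySem.List.pyRange a b = [] :=
        List.eq_nil_of_length_eq_zero (by rw [PySem.List.length_pyRange_one]; omega)
      simp [hnil]

lemma foldB_char (vs : List Int) (hs : vs.Pairwise (· ≤ ·)) (N : Int) (hN : N = (vs.length : Int)) :
    ∀ (k : Nat) (a b : Int) (acc : List Int) (p : Nat), (b - a).toNat ≤ k → p ≤ pvTW vs a →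
    ((PySem.List.pyRange a b).foldl (fun (s : List Int × Nat) j =>
        (s.1 ++ PySem.List.pyRange (N + j - 1) (N + j - 1 - (N - (advP vs j s.2 : Int))) (-1),
          advP vs j s.2)) (acc, p)).1
    = acc ++ (PySem.List.pyRange a b).flatMap
        (fun j => PySem.List.pyRange (N + j - 1) (N + j - 1 - (pvCnt vs j : Int)) (-1)) := by
  intro k
  induction k with
  | zero =>
    intro a b acc p hk hp
    have hnil : PySem.List.pyRange a b = [] :=
      List.eq_nil_of_length_eq_zero (by rw [PySem.List.length_pyRange_one]; omega)
    simp [hnil]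
  | succ k ih =>
    intro a b acc p hk hp
    by_cases hab : a < b
    · rw [PySem.List.pyRange_one_cons hab]
      simp only [List.foldl_cons, List.flatMap_cons]
      have hadv : advP vs a p = pvTW vs a := advP_eq_pvTW vs a vs.length p (by omega) hp
      have hcnt : (pvCnt vs a : Int) = N - (pvTW vs a : Int) := by
        have h1 := pvCnt_eq vs hs a
        have h2 := pvTW_le vs a
        omega
      rw [hadv, show N + a - 1 - (N - (pvTW vs a : Int)) = N + a - 1 - (pvCnt vs a : Int) from by omega]
      rw [ih (a + 1) b _ (pvTW vs a) (by omega) (pvTW_mono vs hs (by omega)), List.append_assoc]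
    · have hnil : PySem.List.pyRange a b = [] :=
        List.eq_nil_of_length_eq_zero (by rw [PySem.List.length_pyRange_one]; omega)
      simp [hnil]

lemma max_word0 (n : Nat) (hn : 0 < n) :
    PySem.List.max? ((PySem.List.pyRange 0 (n : Int)).flatMap
      (fun j => PySem.List.pyRange (2 * j + 1) j (-1))) (fun x => x)
    = some (2 * (n : Int) - 1) := by
  have hmem : (2 * (n : Int) - 1) ∈ (PySem.List.pyRange 0 (n : Int)).flatMap
      (fun j => PySem.List.pyRange (2 * j + 1) j (-1)) := by
    rw [List.mem_flatMap]
    refine ⟨(n : Int) - 1, PySem.List.mem_pyRange_one.2 ⟨by omega, by omega⟩, ?_⟩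
    rw [PySem.List.mem_pyRange_neg_one]
    omega
  cases hmax : PySem.List.max? ((PySem.List.pyRange 0 (n : Int)).flatMap
      (fun j => PySem.List.pyRange (2 * j + 1) j (-1))) (fun x => x) with
  | none =>
    exfalso
    rw [PySem.List.max?_eq_none_iff] at hmax
    rw [hmax] at hmem
    simp at hmem
  | some m =>
    congr 1
    have hm := PySem.List.max?_mem hmax
    have hub := PySem.List.max?_isMax hmax
    have hle : m ≤ 2 * (n : Int) - 1 := by
      rw [List.mem_flatMap] at hm
      obtain ⟨j, hj, hmj⟩ := hm
      rw [PySem.List.mem_pyRange_one] at hj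
      rw [PySem.List.mem_pyRange_neg_one] at hmj
      omega
    have hge := hub _ hmem
    omega

-- ===== VERDICT (by name: the statement is the Claim_ definition above) =====
theorem minimal_word_spec : Claim_equal_minimal_word := by
  intro mu _
  unfold Spec_minimal_word
  by_cases hz : mu.length = 0
  · simp [minimal_word, minimal_word_alt, hz]
  · have hn : 0 < mu.length := Nat.pos_of_ne_zero hz
    have hz' : ¬ ((mu.length : Int) = 0) := by exact_mod_cast hz
    simp only [minimal_word, minimal_word_alt, if_neg hz, if_neg hz']
    set vals : List Int := (PySem.List.pyRange 0 (mu.length : Int)).map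
        (fun i => PySem.List.pyGetD mu i 0 + i) with hvals
    set vs : List Int := PySem.List.sorted vals (fun x => x) with hvs
    have hperm : vs.Perm vals := PySem.List.sorted_perm vals (fun x => x) false
    have hpw : vs.Pairwise (· ≤ ·) := PySem.List.sorted_pairwise vals (fun x => x)
    have hlen : vs.length = mu.length := by
      rw [hperm.length_eq, hvals, List.length_map, PySem.List.length_pyRange_one]
      simp
    rw [List.foldl_map]
    have hgA : ∀ j : Int, (((PySem.List.pyRange 0 (mu.length : Int)).filter
          (fun i => decide (PySem.List.pyGetD mu i 0 + i ≥ j))).map (fun _ => (1 : Int))).sum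
        = (pvCnt vs j : Int) := by
      intro j
      rw [PySem.List.sum_map_const_int, mul_one]
      norm_cast
      rw [← List.countP_eq_length_filter]
      unfold pvCnt
      rw [hperm.countP_eq, hvals, List.countP_map]
      apply List.countP_congr
      intro i _
      simp [ge_iff_le]
    have hfun : (fun (s : List Int × Int) j =>
          (s.1 ++ PySem.List.pyRange s.2 (s.2 - (((PySem.List.pyRange 0 (mu.length : Int)).filter
            (fun i => decide (PySem.List.pyGetD mu i 0 + i ≥ j))).map (fun _ => (1 : Int))).sum) (-1),
            s.2 + 1))
        = (fun (s : List Int × Int) j =>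
          (s.1 ++ PySem.List.pyRange s.2 (s.2 - (pvCnt vs j : Int)) (-1), s.2 + 1)) := by
      funext s j
      rw [hgA j]
    rw [hfun, max_word0 mu.length hn, Option.getD_some,
      show (2 * (mu.length : Int) - 1 + 1) = ((mu.length : Int) - 1) + ((mu.length : Int) + 1) from by ring,
      foldA_char (fun j => (pvCnt vs j : Int)) ((mu.length : Int) - 1)
        ((PySem.List.pyGetD mu 0 0 + 1) - ((mu.length : Int) + 1)).toNat ((mu.length : Int) + 1)
        (PySem.List.pyGetD mu 0 0 + 1) _ (le_refl _)]
    rw [PySem.List.foldl_append_eq_flatMap, List.nil_append,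
      foldB_char vs hpw (mu.length : Int) (by rw [hlen])
        ((PySem.List.pyGetD mu 0 0 + 1) - ((mu.length : Int) + 1)).toNat ((mu.length : Int) + 1)
        (PySem.List.pyGetD mu 0 0 + 1) _ 0 (le_refl _) (Nat.zero_le _)]
    have hfin : (fun j : Int => PySem.List.pyRange ((mu.length : Int) - 1 + j)
          ((mu.length : Int) - 1 + j - (pvCnt vs j : Int)) (-1))
        = (fun j : Int => PySem.List.pyRange ((mu.length : Int) + j - 1)
          ((mu.length : Int) + j - 1 - (pvCnt vs j : Int)) (-1)) := by
      funext j
      congr 1 <;> ring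
    rw [hfin]
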